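-- pv_equiv track=rewrite | github.com/obtic-sorbonne/Versus | Comparateur.py | _sentence_to_ngram_ranges
-- ===== SOURCE A (Python) =====
-- def _sentence_to_ngram_ranges(word_sent_map, n_words, n):
--     n_ngrams = n_words - n + 1
--     if n_ngrams <= 0:
--         return {}
--     ranges = {}
--     current_sent = -1
--     range_start = 0
--     for ng_idx in range(n_ngrams):
--         sent = int(word_sent_map[ng_idx])
--         if sent != current_sent:
--             if current_sent >= 0:
--                 ranges[current_sent] = (range_start, ng_idx)
--             current_sent = sent
--             range_start = ng_idx
--     if current_sent >= 0:
--         ranges[current_sent] = (range_start, n_ngrams)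
--     return ranges
-- ===== SOURCE B (Python) =====
-- def _sentence_to_ngram_ranges(word_sent_map, n_words, n):
--     n_ngrams = n_words - n + 1
--     if n_ngrams <= 0:
--         return {}
--     prefix = [int(x) for x in word_sent_map[:n_ngrams]]
--     # staged: first compute all run boundaries by comparing adjacent entries,
--     # then turn consecutive boundary pairs into ranges
--     cuts = [0] + [i for i in range(1, n_ngrams) if prefix[i] != prefix[i - 1]] + [n_ngrams]
--     ranges = {}
--     for a, b in zip(cuts, cuts[1:]):
--         if prefix[a] >= 0:
--             ranges[prefix[a]] = (a, b)
--     return ranges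
-- ===== Notes on version B (the rewrite author's own statement) =====
-- stated objective: alternative
-- what changed: B works in stages instead of A's one-pass sentinel state machine: it first computes the list of run boundaries by comparing each entry of the ngram prefix with its predecessor, then zips consecutive boundaries into (start,end) pairs and keys each by the sentence id at its start.
import Mathlib
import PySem

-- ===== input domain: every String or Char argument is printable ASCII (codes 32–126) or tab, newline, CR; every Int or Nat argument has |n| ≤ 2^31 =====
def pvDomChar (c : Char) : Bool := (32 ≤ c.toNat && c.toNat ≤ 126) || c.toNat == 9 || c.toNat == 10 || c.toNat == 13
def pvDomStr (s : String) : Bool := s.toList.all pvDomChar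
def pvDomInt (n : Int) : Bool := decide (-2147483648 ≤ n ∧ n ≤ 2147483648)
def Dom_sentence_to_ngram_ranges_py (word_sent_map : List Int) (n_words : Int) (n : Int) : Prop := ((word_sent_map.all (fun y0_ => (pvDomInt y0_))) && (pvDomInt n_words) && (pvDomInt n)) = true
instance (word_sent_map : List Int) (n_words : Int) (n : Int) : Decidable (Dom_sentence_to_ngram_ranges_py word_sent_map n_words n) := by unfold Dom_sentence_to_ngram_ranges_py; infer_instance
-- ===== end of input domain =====

-- B replaces A's one-pass sentinel state machine by staged passes: compute the run-boundary list
-- by adjacent comparison, then zip consecutive boundaries into ranges (objective: alternative).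


-- ===== PORT A =====
-- A's 'for ng_idx in range(n_ngrams)' with state (ranges, current_sent, range_start), then the
-- final flush; word_sent_map[ng_idx] via pyGet? (Pre_ guarantees the index is in range, .getD 0
-- is never the value used inside Pre_).
def aLoop (ws : List Int) (m : Int) (ranges : PySem.Dict Int (Int × Int))
    (current_sent range_start ng_idx : Int) : PySem.Dict Int (Int × Int) :=
  if h : ng_idx < m then
    let sent := (PySem.List.pyGet? ws ng_idx).getD 0
    if sent ≠ current_sent then
      aLoop ws m (if current_sent ≥ 0 then ranges.insert current_sent (range_start, ng_idx) else ranges)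
        sent ng_idx (ng_idx + 1)
    else
      aLoop ws m ranges current_sent range_start (ng_idx + 1)
  else
    if current_sent ≥ 0 then ranges.insert current_sent (range_start, m) else ranges
termination_by (m - ng_idx).toNat
decreasing_by all_goals omega

def sentence_to_ngram_ranges_py (word_sent_map : List Int) (n_words : Int) (n : Int) : List (Int × Int × Int) :=
  let n_ngrams := n_words - n + 1
  if n_ngrams ≤ 0 then []
  else (aLoop word_sent_map n_ngrams PySem.Dict.empty (-1) 0 0).items

-- ===== PORT B =====
-- B's boundary comprehension '[i for i in range(1, n_ngrams) if prefix[i] != prefix[i-1]]'.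
def changeCuts (pre : List Int) (m : Int) : List Int :=
  (PySem.List.pyRange 1 m 1).filter
    (fun i => (PySem.List.pyGet? pre i).getD 0 != (PySem.List.pyGet? pre (i - 1)).getD 0)

-- the body of B's 'for a, b in zip(cuts, cuts[1:])' loop
def bStep (pre : List Int) (d : PySem.Dict Int (Int × Int)) (p : Int × Int) :
    PySem.Dict Int (Int × Int) :=
  if (PySem.List.pyGet? pre p.1).getD 0 ≥ 0 then
    d.insert ((PySem.List.pyGet? pre p.1).getD 0) (p.1, p.2)
  else d

def sentence_to_ngram_ranges_py_alt (word_sent_map : List Int) (n_words : Int) (n : Int) : List (Int × Int × Int) :=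
  let n_ngrams := n_words - n + 1
  if n_ngrams ≤ 0 then []
  else
    let pre := PySem.List.slice word_sent_map none (some n_ngrams)   -- word_sent_map[:n_ngrams]
    let cuts := 0 :: (changeCuts pre n_ngrams ++ [n_ngrams])
    -- cuts[1:] is cuts.drop 1
    ((cuts.zip (cuts.drop 1)).foldl (bStep pre) PySem.Dict.empty).items

-- ===== PRECONDITION & SPEC =====
-- Pre_ excludes exactly the inputs where A raises IndexError: a positive ngram count larger than
-- the list (B raises there too).
def Pre_sentence_to_ngram_ranges_py (word_sent_map : List Int) (n_words : Int) (n : Int) : Prop :=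
  n_words - n + 1 ≤ 0 ∨ n_words - n + 1 ≤ (word_sent_map.length : Int)
instance (word_sent_map : List Int) (n_words : Int) (n : Int) : Decidable (Pre_sentence_to_ngram_ranges_py word_sent_map n_words n) := by unfold Pre_sentence_to_ngram_ranges_py; infer_instance

def pvWitness_sentence_to_ngram_ranges_py : List Int × Int × Int := ([0, 0, 1], 3, 1)

def Spec_sentence_to_ngram_ranges_py (word_sent_map : List Int) (n_words : Int) (n : Int) (out : List (Int × Int × Int)) : Prop := out = sentence_to_ngram_ranges_py_alt word_sent_map n_words n
instance (word_sent_map : List Int) (n_words : Int) (n : Int) (out : List (Int × Int × Int)) : Decidable (Spec_sentence_to_ngram_ranges_py word_sent_map n_words n out) := by unfold Spec_sentence_to_ngram_ranges_py; infer_instance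

-- ===== CLAIM (what is proved, stated in full; the proofs are below) =====
def Claim_equal_sentence_to_ngram_ranges_py : Prop := ∀ (word_sent_map : List Int) (n_words : Int) (n : Int), Dom_sentence_to_ngram_ranges_py word_sent_map n_words n → Pre_sentence_to_ngram_ranges_py word_sent_map n_words n → Spec_sentence_to_ngram_ranges_py word_sent_map n_words n (sentence_to_ngram_ranges_py word_sent_map n_words n)

-- ===== LEMMAS AND PROOFS =====

-- Proof-side intermediate: the end of the maximal run of value s starting at index j.
def runEnd (v : List Int) (m s j : Int) : Int :=
  if h : j < m ∧ (PySem.List.pyGet? v j).getD 0 = s then runEnd v m s (j + 1) else j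
termination_by (m - j).toNat
decreasing_by omega

theorem le_runEnd (v : List Int) (m s j : Int) : j ≤ runEnd v m s j := by
  rw [runEnd]
  split
  · have := le_runEnd v m s (j + 1); omega
  · omega
termination_by (m - j).toNat
decreasing_by omega

theorem runEnd_le (v : List Int) (m s j : Int) (h : j ≤ m) : runEnd v m s j ≤ m := by
  rw [runEnd]
  split
  · next hc => exact runEnd_le v m s (j + 1) (by omega)
  · omega
termination_by (m - j).toNat
decreasing_by omega

theorem runEnd_stop (v : List Int) (m s j : Int) :
    ¬ (runEnd v m s j < m ∧ (PySem.List.pyGet? v (runEnd v m s j)).getD 0 = s) := by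
  rw [runEnd]
  split
  · exact runEnd_stop v m s (j + 1)
  · next h => exact h
termination_by (m - j).toNat
decreasing_by omega

-- everything strictly inside the run has value s
theorem runEnd_run (v : List Int) (m s j : Int) :
    ∀ i, j ≤ i → i < runEnd v m s j → (PySem.List.pyGet? v i).getD 0 = s := by
  intro i hji hlt
  rw [runEnd] at hlt
  split at hlt
  · next hc =>
    by_cases hij : i = j
    · exact hij ▸ hc.2
    · exact runEnd_run v m s (j + 1) i (by omega) hlt
  · omega
termination_by (m - j).toNat
decreasing_by omega

-- Proof-side run-by-run loop, bridge between A's state machine and B's boundary list.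
def bLoop (v : List Int) (m : Int) (ranges : PySem.Dict Int (Int × Int)) (i : Int) :
    PySem.Dict Int (Int × Int) :=
  if h : i < m then
    let s := (PySem.List.pyGet? v i).getD 0
    let j := runEnd v m s (i + 1)
    bLoop v m (if s ≥ 0 then ranges.insert s (i, j) else ranges) j
  else ranges
termination_by (m - i).toNat
decreasing_by
  have hj : i + 1 ≤ runEnd v m ((PySem.List.pyGet? v i).getD 0) (i + 1) := le_runEnd v m _ (i + 1)
  omega

-- A's loop does not change state while inside a run of the current sentence.
theorem aLoop_run (v : List Int) (m : Int) (ranges : PySem.Dict Int (Int × Int))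
    (s rs j : Int) : aLoop v m ranges s rs j = aLoop v m ranges s rs (runEnd v m s j) := by
  rw [runEnd]
  split
  · next h =>
    rw [aLoop]
    simp only [dif_pos h.1, h.2, ne_eq, not_true_eq_false, if_false]
    exact aLoop_run v m ranges s rs (j + 1)
  · rfl
termination_by (m - j).toNat
decreasing_by omega

-- A with state (cs, rs) at the end of the current run behaves like bLoop after flushing that run.
theorem aLoop_eq_bLoop (v : List Int) (m k : Int) (hk : k ≤ m)
    (ranges : PySem.Dict Int (Int × Int)) (cs rs : Int)
    (H : cs < 0 ∨ ¬ (k < m ∧ (PySem.List.pyGet? v k).getD 0 = cs)) :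
    aLoop v m ranges cs rs k =
      bLoop v m (if cs ≥ 0 then ranges.insert cs (rs, k) else ranges) k := by
  by_cases hkm : k < m
  · rw [aLoop, bLoop]
    simp only [dif_pos hkm]
    by_cases hsc : (PySem.List.pyGet? v k).getD 0 = cs
    · have hcs : cs < 0 := by
        rcases H with h | h
        · exact h
        · exact absurd ⟨hkm, hsc⟩ h
      have hj1 : k + 1 ≤ runEnd v m cs (k + 1) := le_runEnd v m cs (k + 1)
      have hj2 : runEnd v m cs (k + 1) ≤ m := runEnd_le v m cs (k + 1) (by omega)
      simp only [hsc, ne_eq, not_true_eq_false, if_false]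
      rw [aLoop_run v m ranges cs rs (k + 1)]
      rw [aLoop_eq_bLoop v m (runEnd v m cs (k + 1)) hj2 ranges cs rs
        (Or.inr (runEnd_stop v m cs (k + 1)))]
      simp only [if_neg (by omega : ¬ cs ≥ 0)]
    · have hj1 : k + 1 ≤ runEnd v m ((PySem.List.pyGet? v k).getD 0) (k + 1) :=
        le_runEnd v m _ (k + 1)
      have hj2 : runEnd v m ((PySem.List.pyGet? v k).getD 0) (k + 1) ≤ m :=
        runEnd_le v m _ (k + 1) (by omega)
      simp only [hsc, ne_eq, not_false_eq_true, if_true]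
      rw [aLoop_run v m _ ((PySem.List.pyGet? v k).getD 0) k (k + 1)]
      rw [aLoop_eq_bLoop v m (runEnd v m ((PySem.List.pyGet? v k).getD 0) (k + 1)) hj2 _
        ((PySem.List.pyGet? v k).getD 0) k
        (Or.inr (runEnd_stop v m ((PySem.List.pyGet? v k).getD 0) (k + 1)))]
  · have hkm' : k = m := by omega
    rw [aLoop, bLoop]
    simp only [hkm', dif_neg (lt_irrefl m)]
termination_by (m - k).toNat
decreasing_by all_goals omega

-- recursive form of B's fold over the successive boundary pairs
def fp (v : List Int) (d : PySem.Dict Int (Int × Int)) (a : Int) :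
    List Int → PySem.Dict Int (Int × Int)
  | [] => d
  | b :: rest => fp v (bStep v d (a, b)) b rest

theorem zip_foldl_eq_fp (v : List Int) (cuts : List Int) (a : Int)
    (d : PySem.Dict Int (Int × Int)) :
    ((a :: cuts).zip cuts).foldl (bStep v) d = fp v d a cuts := by
  induction cuts generalizing a d with
  | nil => rfl
  | cons b rest ih => simp only [List.zip_cons_cons, List.foldl_cons, fp]; exact ih b _

-- the boundary predicate of changeCuts
theorem cuts_run (v : List Int) (m j a : Int) (hj : j < m)
    (ha1 : j + 1 ≤ a) (ha2 : a ≤ runEnd v m ((PySem.List.pyGet? v j).getD 0) (j + 1)) :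
    (PySem.List.pyRange a m 1).filter
        (fun i => (PySem.List.pyGet? v i).getD 0 != (PySem.List.pyGet? v (i - 1)).getD 0) =
      (if runEnd v m ((PySem.List.pyGet? v j).getD 0) (j + 1) < m then
        runEnd v m ((PySem.List.pyGet? v j).getD 0) (j + 1) ::
          (PySem.List.pyRange (runEnd v m ((PySem.List.pyGet? v j).getD 0) (j + 1) + 1) m 1).filter
            (fun i => (PySem.List.pyGet? v i).getD 0 != (PySem.List.pyGet? v (i - 1)).getD 0)
      else []) := by
  have hem : runEnd v m ((PySem.List.pyGet? v j).getD 0) (j + 1) ≤ m :=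
    runEnd_le v m _ (j + 1) (by omega)
  have hrun : ∀ i, j ≤ i → i < runEnd v m ((PySem.List.pyGet? v j).getD 0) (j + 1) →
      (PySem.List.pyGet? v i).getD 0 = (PySem.List.pyGet? v j).getD 0 := by
    intro i h1 h2
    by_cases hij : i = j
    · rw [hij]
    · exact runEnd_run v m _ (j + 1) i (by omega) h2
  by_cases hae : a = runEnd v m ((PySem.List.pyGet? v j).getD 0) (j + 1)
  · by_cases ham : runEnd v m ((PySem.List.pyGet? v j).getD 0) (j + 1) < m
    · rw [if_pos ham, hae, PySem.List.pyRange_one_cons ham]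
      have h1 : (PySem.List.pyGet? v (runEnd v m ((PySem.List.pyGet? v j).getD 0) (j + 1))).getD 0
          ≠ (PySem.List.pyGet? v j).getD 0 := by
        have := runEnd_stop v m ((PySem.List.pyGet? v j).getD 0) (j + 1)
        intro hc; exact this ⟨ham, hc⟩
      have h2 : (PySem.List.pyGet? v (runEnd v m ((PySem.List.pyGet? v j).getD 0) (j + 1) - 1)).getD 0
          = (PySem.List.pyGet? v j).getD 0 := hrun _ (by omega) (by omega)
      simp only [List.filter_cons]
      rw [h2, if_pos (by simpa using h1)]
    · rw [if_neg ham]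
      have hma : m ≤ a := by omega
      simp [PySem.List.pyRange_one_eq_nil hma]
  · have halt : a < runEnd v m ((PySem.List.pyGet? v j).getD 0) (j + 1) := by omega
    have ham : a < m := by omega
    rw [PySem.List.pyRange_one_cons ham]
    have h1 : (PySem.List.pyGet? v a).getD 0 = (PySem.List.pyGet? v j).getD 0 :=
      hrun a (by omega) halt
    have h2 : (PySem.List.pyGet? v (a - 1)).getD 0 = (PySem.List.pyGet? v j).getD 0 :=
      hrun (a - 1) (by omega) (by omega)
    simp only [List.filter_cons]
    rw [h1, h2, if_neg (by simp)]
    exact cuts_run v m j (a + 1) hj (by omega) (by omega)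
termination_by (runEnd v m ((PySem.List.pyGet? v j).getD 0) (j + 1) - a).toNat
decreasing_by omega

theorem bLoop_unfold (v : List Int) (m : Int) (d : PySem.Dict Int (Int × Int)) (j : Int)
    (hj : j < m) :
    bLoop v m d j =
      bLoop v m (bStep v d (j, runEnd v m ((PySem.List.pyGet? v j).getD 0) (j + 1)))
        (runEnd v m ((PySem.List.pyGet? v j).getD 0) (j + 1)) := by
  rw [bLoop]
  simp only [dif_pos hj, bStep]

theorem bLoop_stop (v : List Int) (m : Int) (d : PySem.Dict Int (Int × Int)) (j : Int)
    (hj : ¬ j < m) : bLoop v m d j = d := by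
  rw [bLoop]; simp only [dif_neg hj]

-- B's pair fold over the boundaries from j equals the run-by-run loop from j.
theorem fp_eq_bLoop (v : List Int) (m : Int) (j : Int) (hj : j < m)
    (d : PySem.Dict Int (Int × Int)) :
    fp v d j (((PySem.List.pyRange (j + 1) m 1).filter
        (fun i => (PySem.List.pyGet? v i).getD 0 != (PySem.List.pyGet? v (i - 1)).getD 0)) ++ [m]) =
      bLoop v m d j := by
  have he1 : j + 1 ≤ runEnd v m ((PySem.List.pyGet? v j).getD 0) (j + 1) :=
    le_runEnd v m _ (j + 1)
  have hem : runEnd v m ((PySem.List.pyGet? v j).getD 0) (j + 1) ≤ m :=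
    runEnd_le v m _ (j + 1) (by omega)
  rw [cuts_run v m j (j + 1) hj le_rfl he1, bLoop_unfold v m d j hj]
  by_cases hlt : runEnd v m ((PySem.List.pyGet? v j).getD 0) (j + 1) < m
  · rw [if_pos hlt]
    simp only [List.cons_append, fp]
    exact fp_eq_bLoop v m _ hlt (bStep v d (j, runEnd v m ((PySem.List.pyGet? v j).getD 0) (j + 1)))
  · rw [if_neg hlt]
    have hme : runEnd v m ((PySem.List.pyGet? v j).getD 0) (j + 1) = m := by omega
    rw [hme]
    simp only [List.nil_append, fp]
    rw [bLoop_stop v m _ m (lt_irrefl m)]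
termination_by (m - j).toNat
decreasing_by omega

-- the two loops read the same prefix: swapping v for an index-agreeing list changes nothing
theorem aLoop_congr (v w : List Int) (m : Int)
    (h : ∀ i : Int, 0 ≤ i → i < m → PySem.List.pyGet? v i = PySem.List.pyGet? w i)
    (d : PySem.Dict Int (Int × Int)) (cs rs k : Int) (hk : 0 ≤ k) :
    aLoop v m d cs rs k = aLoop w m d cs rs k := by
  conv_lhs => rw [aLoop]
  conv_rhs => rw [aLoop]
  by_cases hkm : k < m
  · simp only [dif_pos hkm, h k hk hkm]
    by_cases hc : (PySem.List.pyGet? w k).getD 0 ≠ cs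
    · simp only [if_pos hc]
      exact aLoop_congr v w m h _ _ _ (k + 1) (by omega)
    · simp only [if_neg hc]
      exact aLoop_congr v w m h _ _ _ (k + 1) (by omega)
  · simp only [dif_neg hkm]
termination_by (m - k).toNat
decreasing_by all_goals omega

theorem pyGet?_take (ws : List Int) (mN : Nat) (i : Int) (h0 : 0 ≤ i) (him : i < (mN : Int)) :
    PySem.List.pyGet? (ws.take mN) i = PySem.List.pyGet? ws i := by
  rw [PySem.List.pyGet?_of_nonneg _ h0, PySem.List.pyGet?_of_nonneg _ h0]
  rw [List.getElem?_take]
  have : i.toNat < mN := by omega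
  simp [this]

-- ===== VERDICT (by name: the statement is the Claim_ definition above) =====
theorem sentence_to_ngram_ranges_py_spec : Claim_equal_sentence_to_ngram_ranges_py := by
  intro ws nw n _ hpre
  unfold Spec_sentence_to_ngram_ranges_py sentence_to_ngram_ranges_py sentence_to_ngram_ranges_py_alt
  by_cases h : nw - n + 1 ≤ 0
  · simp [h]
  · simp only [h, if_false]
    set m : Int := nw - n + 1 with hm
    have hmlen : m ≤ (ws.length : Int) := by
      rcases hpre with hc | hc
      · omega
      · exact hc
    have hm0 : 0 < m := by omega
    have hpre_eq : PySem.List.slice ws none (some m) = ws.take m.toNat :=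
      PySem.List.slice_to ws (by omega)
    have hagree : ∀ i : Int, 0 ≤ i → i < m →
        PySem.List.pyGet? (PySem.List.slice ws none (some m)) i = PySem.List.pyGet? ws i := by
      intro i h0 him
      rw [hpre_eq]
      exact pyGet?_take ws m.toNat i h0 (by omega)
    set pre := PySem.List.slice ws none (some m) with hpredef
    -- A on ws = A on pre = bLoop on pre
    rw [aLoop_congr ws pre m (fun i h0 him => (hagree i h0 him).symm) PySem.Dict.empty (-1) 0 0 le_rfl]
    have hA := aLoop_eq_bLoop pre m 0 (by omega) PySem.Dict.empty (-1) 0 (Or.inl (by omega))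
    simp only [show ¬ (-1 : Int) ≥ 0 by omega, if_false] at hA
    rw [hA]
    -- B's fold = fp = bLoop on pre
    simp only [List.drop_succ_cons, List.drop_zero]
    rw [zip_foldl_eq_fp pre (changeCuts pre m ++ [m]) 0 PySem.Dict.empty]
    have hB := fp_eq_bLoop pre m 0 hm0 PySem.Dict.empty
    simp only [zero_add] at hB
    unfold changeCuts
    rw [hB]
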